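-- pv_equiv track=rewrite | github.com/coderop2/Stitching-Warping-Transformation-Create_Panorama | part1-experiments.py | get_tp_count
-- ===== SOURCE A (Python) =====
-- def get_tp_count(l):
-- 	tp = 0
-- 	n = len(l)
-- 	for i in range(n):
-- 		for j in range(i+1,n):
-- 			if (l[i].split('_')[0] == l[j].split('_')[0]):
-- 				tp = tp + 1
-- 	return tp
-- ===== SOURCE B (Python) =====
-- def get_tp_count(l):
-- 	# One pass: count, per underscore-prefix, how many earlier strings shared it.
-- 	counts = {}
-- 	tp = 0
-- 	for s in l:
-- 		p = s.split('_')[0]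
-- 		c = counts.get(p, 0)
-- 		tp += c
-- 		counts[p] = c + 1
-- 	return tp
-- ===== Notes on version B (the rewrite author's own statement) =====
-- stated objective: faster
-- what changed: Replaces the quadratic all-pairs index scan by a single pass that keeps a dict of prefix multiplicities and adds, for each string, the number of earlier strings with the same prefix.
import Mathlib
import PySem

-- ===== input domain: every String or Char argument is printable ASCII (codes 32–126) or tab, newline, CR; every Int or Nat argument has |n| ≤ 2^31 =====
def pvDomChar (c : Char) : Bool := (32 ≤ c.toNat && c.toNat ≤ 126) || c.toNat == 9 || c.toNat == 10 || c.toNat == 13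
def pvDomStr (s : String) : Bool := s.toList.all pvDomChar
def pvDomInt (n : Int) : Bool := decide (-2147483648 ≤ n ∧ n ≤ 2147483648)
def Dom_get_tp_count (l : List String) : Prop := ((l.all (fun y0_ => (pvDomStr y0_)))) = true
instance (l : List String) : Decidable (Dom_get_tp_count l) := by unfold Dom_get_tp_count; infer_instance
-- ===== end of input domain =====

-- B replaces A's quadratic all-pairs scan by one pass over the list with a dict of
-- prefix multiplicities (objective: faster, asymptotic O(n^2) -> O(n)).


-- ===== PORT A =====
-- s.split('_')[0], used verbatim by both Pythons; split with a nonempty separator is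
-- never the empty list, so the [0] never raises and the total getD/pyGetD forms are exact.
def pvPrefix (s : String) : String :=
  PySem.List.pyGetD ((PySem.Str.split? s "_").getD []) 0 ""

def get_tp_count (l : List String) : Int :=
  let n : Int := PySem.List.len l
  (PySem.List.pyRange 0 n).foldl (fun tp i =>
    (PySem.List.pyRange (i + 1) n).foldl (fun tp j =>
      if pvPrefix (PySem.List.pyGetD l i "") == pvPrefix (PySem.List.pyGetD l j "")
      then tp + 1 else tp) tp) 0

-- ===== PORT B =====
def get_tp_count_alt (l : List String) : Int :=
  (l.foldl (fun (st : PySem.Dict String Int × Int) s =>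
      let p := pvPrefix s
      let c := st.1.getD p 0
      (st.1.insert p (c + 1), st.2 + c))
    (PySem.Dict.empty, 0)).2

-- ===== PRECONDITION & SPEC =====
def Spec_get_tp_count (l : List String) (out : Int) : Prop := out = get_tp_count_alt l
instance (l : List String) (out : Int) : Decidable (Spec_get_tp_count l out) := by unfold Spec_get_tp_count; infer_instance

-- ===== CLAIM (what is proved, stated in full; the proofs are below) =====
def Claim_equal_get_tp_count : Prop := ∀ (l : List String), Dom_get_tp_count l → Spec_get_tp_count l (get_tp_count l)

-- ===== LEMMAS AND PROOFS =====

-- number of unordered pairs sharing a prefix, counted by the earlier element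
def pvPairs : List String → Int
  | [] => 0
  | x :: xs => ((xs.countP (fun y => pvPrefix x == pvPrefix y) : Nat) : Int) + pvPairs xs

lemma pvB_loop (xs : List String) (d : PySem.Dict String Int) (t : Int) :
    (xs.foldl (fun (st : PySem.Dict String Int × Int) s =>
        let p := pvPrefix s
        let c := st.1.getD p 0
        (st.1.insert p (c + 1), st.2 + c)) (d, t)).2
    = t + (xs.map (fun y => d.getD (pvPrefix y) 0)).sum + pvPairs xs := by
  induction xs generalizing d t with
  | nil => simp [pvPairs]
  | cons x xs ih =>
    simp only [List.foldl_cons]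
    rw [ih]
    have hmap : xs.map (fun y => (d.insert (pvPrefix x) (d.getD (pvPrefix x) 0 + 1)).getD (pvPrefix y) 0)
        = xs.map (fun y => d.getD (pvPrefix y) 0
            + (if (fun y => pvPrefix x == pvPrefix y) y then (1:Int) else 0)) := by
      apply List.map_congr_left
      intro y _
      rw [PySem.Dict.getD_insert]
      simp only [beq_iff_eq]
      by_cases h : pvPrefix y = pvPrefix x
      · rw [if_pos h, if_pos h.symm, h]
      · rw [if_neg h, if_neg (fun e => h e.symm), add_zero]
    rw [hmap, PySem.List.sum_map_add_int, PySem.List.sum_map_ite_one_zero]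
    simp [pvPairs]
    ring

lemma pvB_eq_pairs (l : List String) : get_tp_count_alt l = pvPairs l := by
  unfold get_tp_count_alt
  rw [pvB_loop]
  simp [PySem.Dict.getD_empty]

lemma pvA_sum (l : List String) :
    ((List.range l.length).map (fun k =>
      (((l.drop (k+1)).countP (fun y => pvPrefix (l.getD k "") == pvPrefix y) : Nat) : Int))).sum
    = pvPairs l := by
  induction l with
  | nil => simp [pvPairs]
  | cons x xs ih =>
    rw [List.length_cons, List.range_succ_eq_map]
    simp only [List.map_cons, List.map_map, List.sum_cons]
    have : (List.range xs.length).map ((fun k =>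
        ((((x :: xs).drop (k+1)).countP (fun y => pvPrefix ((x :: xs).getD k "") == pvPrefix y) : Nat) : Int)) ∘ Nat.succ)
        = (List.range xs.length).map (fun k =>
        (((xs.drop (k+1)).countP (fun y => pvPrefix (xs.getD k "") == pvPrefix y) : Nat) : Int)) := by
      apply List.map_congr_left
      intro k _
      simp
    rw [this, ih]
    simp [pvPairs]

lemma pvA_eq_pairs (l : List String) : get_tp_count l = pvPairs l := by
  unfold get_tp_count
  have h1 : (PySem.List.pyRange 0 (PySem.List.len l)).foldl (fun tp i =>
      (PySem.List.pyRange (i + 1) (PySem.List.len l)).foldl (fun tp j =>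
        if pvPrefix (PySem.List.pyGetD l i "") == pvPrefix (PySem.List.pyGetD l j "")
        then tp + 1 else tp) tp) 0
      = (PySem.List.pyRange 0 (PySem.List.len l)).foldl (fun tp i =>
        tp + (((l.drop (i+1).toNat).countP
          (fun y => pvPrefix (PySem.List.pyGetD l i "") == pvPrefix y) : Nat) : Int)) 0 := by
    apply PySem.List.foldl_congr_mem
    intro tp i hi
    rw [PySem.List.foldl_pyRange_pyGetD _ "" (fun tp y =>
        if pvPrefix (PySem.List.pyGetD l i "") == pvPrefix y then tp + 1 else tp) tp
        (by have := (PySem.List.mem_pyRange_one.mp hi).1; omega)]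
    rw [PySem.List.foldl_count_if]
  rw [h1, PySem.List.foldl_add]
  have h2 : (PySem.List.pyRange 0 (PySem.List.len l)).map (fun i =>
      (((l.drop (i+1).toNat).countP
        (fun y => pvPrefix (PySem.List.pyGetD l i "") == pvPrefix y) : Nat) : Int))
      = (List.range l.length).map (fun k =>
      (((l.drop (k+1)).countP (fun y => pvPrefix (l.getD k "") == pvPrefix y) : Nat) : Int)) := by
    have hlen : PySem.List.len l = (l.length : Int) := by simp [PySem.List.len]
    rw [hlen, PySem.List.pyRange_zero_nat, List.map_map]
    apply List.map_congr_left
    intro k _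
    have : ((k : Int) + 1).toNat = k + 1 := by omega
    simp [this]
  rw [h2, pvA_sum]
  ring

-- ===== VERDICT (by name: the statement is the Claim_ definition above) =====
theorem get_tp_count_spec : Claim_equal_get_tp_count := by
  intro l _
  unfold Spec_get_tp_count
  rw [pvA_eq_pairs, pvB_eq_pairs]
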